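-- pv_equiv track=rewrite | github.com/Agent-Creeper06/Graph | step 5.py | bfs_graph
-- ===== SOURCE A (Python) =====
-- from collections import deque
--
-- def bfs_graph(graph, start, max_depth, substr): #Постройка графа зависимостей
--     visited = set() #Массив для записи посещённых
--     edges = []
--
--     q = deque() #Очередь для прохождения дерева в ширину
--     q.append((start, 0)) #Добавляем нулевой элемент
--     visited.add(start) #Добавляем этот элемент в посещённые
--
--     while q:
--         cur, depth = q.popleft()
--         if depth >= max_depth: #Проверка, что текущая глубина не превысила заданную
--             continue
--
--         for d in graph.get(cur, []):
--             if substr and substr in d: #Если пакет содержит подстроку, то он пропускается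
--                 continue
--
--             edges.append((cur, d))
--
--             if d not in visited: #Добавление посещённого пакета в список во избежании бесконечных циклов
--                 visited.add(d)
--                 q.append((d, depth + 1))
--
--     return edges
-- ===== SOURCE B (Python) =====
-- def bfs_graph(graph, start, max_depth, substr):
--     edges = []
--     visited = {start}
--     frontier = [start]
--     for _ in range(max_depth):
--         if not frontier:
--             break
--         next_frontier = []
--         for cur in frontier:
--             for d in graph.get(cur, []):
--                 if substr and substr in d:
--                     continue
--                 edges.append((cur, d))
--                 if d not in visited:
--                     visited.add(d)
--                     next_frontier.append(d)
--         frontier = next_frontier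
--     return edges
-- ===== Notes on version B (the rewrite author's own statement) =====
-- stated objective: simpler
-- what changed: Replaced the single deque loop carrying per-node (node, depth) tags with level-synchronous BFS: a `for depth in range(max_depth)` loop over explicit frontier lists, so no depth bookkeeping per queue entry is needed; edge order and visited behaviour are preserved exactly.
import Mathlib
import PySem

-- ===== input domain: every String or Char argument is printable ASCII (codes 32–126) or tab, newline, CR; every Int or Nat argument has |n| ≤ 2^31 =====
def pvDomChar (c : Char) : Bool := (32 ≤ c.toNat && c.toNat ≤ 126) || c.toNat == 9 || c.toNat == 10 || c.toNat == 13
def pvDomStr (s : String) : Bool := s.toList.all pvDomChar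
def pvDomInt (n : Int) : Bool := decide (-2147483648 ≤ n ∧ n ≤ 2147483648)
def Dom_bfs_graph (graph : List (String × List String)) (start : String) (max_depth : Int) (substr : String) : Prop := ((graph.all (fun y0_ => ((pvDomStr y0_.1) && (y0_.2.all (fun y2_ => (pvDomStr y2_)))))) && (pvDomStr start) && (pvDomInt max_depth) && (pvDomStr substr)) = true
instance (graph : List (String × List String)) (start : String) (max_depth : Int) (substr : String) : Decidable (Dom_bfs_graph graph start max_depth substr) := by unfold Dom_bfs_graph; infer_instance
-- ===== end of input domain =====

-- B replaces A's single deque loop with per-node depth tags by level-synchronous BFS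
-- (two nested loops over explicit frontier lists); objective: simpler, same edge order.

-- ===== PORT A =====

-- helper for A's termination measure: all strings that can ever be newly visited
def pvCand (graph : List (String × List String)) : Finset String :=
  (graph.flatMap Prod.snd).toFinset

-- the body of A's inner `for d in graph.get(cur, [])` loop; state = (edges, visited, q)
def pvInnerA (substr cur : String) (depth : Int)
    (st : List (String × String) × PySem.Set String × List (String × Int)) (d : String) :
    List (String × String) × PySem.Set String × List (String × Int) :=
  if (!(substr == "")) && PySem.Str.isIn substr d then st
  else
    let e := st.1 ++ [(cur, d)]
    if PySem.Set.contains st.2.1 d then (e, st.2.1, st.2.2)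
    else (e, PySem.Set.add st.2.1 d, st.2.2 ++ [(d, depth + 1)])

-- effect of the inner fold on visited/queue (needed for loopA's termination)
theorem pvInnerA_fold_spec (substr cur : String) (depth : Int) :
    ∀ (ns : List String) (e : List (String × String)) (v : PySem.Set String)
      (q : List (String × Int)),
      ∃ new : List String,
        (ns.foldl (pvInnerA substr cur depth) (e, v, q)).2.1 = v ++ new ∧
        (ns.foldl (pvInnerA substr cur depth) (e, v, q)).2.2 =
          q ++ new.map (fun d => (d, depth + 1)) ∧
        ∀ x ∈ new, x ∈ ns ∧ x ∉ v := by
  intro ns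
  induction ns with
  | nil => intro e v q; exact ⟨[], by simp⟩
  | cons d ns ih =>
    intro e v q
    simp only [List.foldl_cons]
    by_cases h1 : ((!(substr == "")) && PySem.Str.isIn substr d) = true
    · have hstep : pvInnerA substr cur depth (e, v, q) d = (e, v, q) := by
        simp only [pvInnerA]; rw [if_pos h1]
      rw [hstep]
      obtain ⟨new, hv, hq, hmem⟩ := ih e v q
      exact ⟨new, hv, hq,
        fun x hx => ⟨List.mem_cons_of_mem _ (hmem x hx).1, (hmem x hx).2⟩⟩
    · by_cases h2 : PySem.Set.contains v d = true
      · have hstep : pvInnerA substr cur depth (e, v, q) d = (e ++ [(cur, d)], v, q) := by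
          simp only [pvInnerA, h1, Bool.false_eq_true, if_false, h2, if_true]
        rw [hstep]
        obtain ⟨new, hv, hq, hmem⟩ := ih (e ++ [(cur, d)]) v q
        exact ⟨new, hv, hq,
          fun x hx => ⟨List.mem_cons_of_mem _ (hmem x hx).1, (hmem x hx).2⟩⟩
      · have hdv : d ∉ v := by simpa [PySem.Set.contains] using h2
        have hstep : pvInnerA substr cur depth (e, v, q) d =
            (e ++ [(cur, d)], v ++ [d], q ++ [(d, depth + 1)]) := by
          simp only [pvInnerA, h1, Bool.false_eq_true, if_false, h2, PySem.Set.add]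
        rw [hstep]
        obtain ⟨new, hv, hq, hmem⟩ := ih (e ++ [(cur, d)]) (v ++ [d]) (q ++ [(d, depth + 1)])
        refine ⟨d :: new, ?_, ?_, ?_⟩
        · simpa [List.append_assoc] using hv
        · simpa [List.append_assoc] using hq
        · intro x hx
          rcases List.mem_cons.mp hx with rfl | hx
          · exact ⟨List.mem_cons_self, hdv⟩
          · refine ⟨List.mem_cons_of_mem _ (hmem x hx).1, fun hxv => (hmem x hx).2 ?_⟩
            exact List.mem_append_left _ hxv

theorem pvGetD_mk_sub (graph : List (String × List String)) (cur : String) :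
    ∀ x ∈ (PySem.Dict.mk graph).getD cur [], x ∈ graph.flatMap Prod.snd := by
  induction graph with
  | nil => intro x hx; simp [PySem.Dict.getD, PySem.Dict.get?] at hx
  | cons p rest ih =>
    intro x hx
    rw [PySem.Dict.getD_eq_get?_getD] at hx
    rw [PySem.Dict.get?_mk_cons] at hx
    by_cases h : (p.1 == cur) = true
    · simp [h] at hx
      exact List.mem_flatMap.mpr ⟨p, List.mem_cons_self, hx⟩
    · simp only [h, Bool.false_eq_true, if_false] at hx
      rw [← PySem.Dict.getD_eq_get?_getD] at hx
      exact List.mem_flatMap_of_mem (List.mem_cons_of_mem _ (List.mem_flatMap.mp (ih x hx)).choose_spec.1) (List.mem_flatMap.mp (ih x hx)).choose_spec.2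

-- A's while-loop: pop (cur, depth); skip if depth >= max_depth; else run the inner loop
def pvLoopA (graph : List (String × List String)) (max_depth : Int) (substr : String) :
    List (String × Int) → PySem.Set String → List (String × String) → List (String × String)
  | [], _, e => e
  | (cur, depth) :: rest, v, e =>
    if depth ≥ max_depth then pvLoopA graph max_depth substr rest v e
    else
      let st := ((PySem.Dict.mk graph).getD cur []).foldl (pvInnerA substr cur depth)
        (e, v, rest)
      pvLoopA graph max_depth substr st.2.2 st.2.1 st.1
  termination_by q v _ => ((pvCand graph \ v.toFinset).card, q.length)
  decreasing_by
  · exact Prod.Lex.right' _ (le_refl _) (Nat.lt_succ_self _)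
  · obtain ⟨new, hv, hq, hmem⟩ :=
      pvInnerA_fold_spec substr cur depth ((PySem.Dict.mk graph).getD cur []) e v rest
    cases new with
    | nil =>
      refine Prod.Lex.right' _ ?_ ?_
      · rw [hv, List.append_nil]
      · rw [hq]; simp
    | cons d new' =>
      apply Prod.Lex.left
      apply Finset.card_lt_card
      constructor
      · intro x hx
        simp only [Finset.mem_sdiff, List.mem_toFinset] at hx ⊢
        refine ⟨hx.1, fun hc => hx.2 ?_⟩
        rw [hv]
        exact List.mem_append_left _ hc
      · intro hsub
        have hd1 : d ∈ pvCand graph := by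
          simp only [pvCand, List.mem_toFinset]
          exact pvGetD_mk_sub graph cur d (hmem d List.mem_cons_self).1
        have hin : d ∈ pvCand graph \ v.toFinset := by
          simp only [Finset.mem_sdiff, List.mem_toFinset]
          exact ⟨hd1, (hmem d List.mem_cons_self).2⟩
        have hcon := hsub hin
        simp only [Finset.mem_sdiff, List.mem_toFinset, hv, List.mem_append] at hcon
        exact hcon.2 (Or.inr List.mem_cons_self)

def bfs_graph (graph : List (String × List String)) (start : String) (max_depth : Int) (substr : String) : List (String × String) :=
  pvLoopA graph max_depth substr [(start, 0)] (PySem.Set.add PySem.Set.empty start) []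

-- ===== PORT B =====

-- the body of B's innermost `for d in graph.get(cur, [])` loop; state = (edges, visited, next_frontier)
def pvInnerB (substr cur : String)
    (st : List (String × String) × PySem.Set String × List String) (d : String) :
    List (String × String) × PySem.Set String × List String :=
  if (!(substr == "")) && PySem.Str.isIn substr d then st
  else
    let e := st.1 ++ [(cur, d)]
    if PySem.Set.contains st.2.1 d then (e, st.2.1, st.2.2)
    else (e, PySem.Set.add st.2.1 d, st.2.2 ++ [d])

-- B's `for depth in range(max_depth)` loop over whole levels
def pvLevelB (graph : List (String × List String)) (substr : String) :
    Nat → List String → PySem.Set String → List (String × String) → List (String × String)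
  | 0, _, _, e => e
  | n + 1, frontier, v, e =>
    if frontier = [] then e
    else
    let st := frontier.foldl
      (fun st cur => ((PySem.Dict.mk graph).getD cur []).foldl (pvInnerB substr cur) st)
      (e, v, [])
    pvLevelB graph substr n st.2.2 st.2.1 st.1

def bfs_graph_alt (graph : List (String × List String)) (start : String) (max_depth : Int) (substr : String) : List (String × String) :=
  pvLevelB graph substr max_depth.toNat [start] (PySem.Set.ofList [start]) []

-- ===== PRECONDITION & SPEC =====
def Spec_bfs_graph (graph : List (String × List String)) (start : String) (max_depth : Int) (substr : String) (out : List (String × String)) : Prop := out = bfs_graph_alt graph start max_depth substr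
instance (graph : List (String × List String)) (start : String) (max_depth : Int) (substr : String) (out : List (String × String)) : Decidable (Spec_bfs_graph graph start max_depth substr out) := by unfold Spec_bfs_graph; infer_instance

-- ===== CLAIM (what is proved, stated in full; the proofs are below) =====
def Claim_equal_bfs_graph : Prop := ∀ (graph : List (String × List String)) (start : String) (max_depth : Int) (substr : String), Dom_bfs_graph graph start max_depth substr → Spec_bfs_graph graph start max_depth substr (bfs_graph graph start max_depth substr)

-- ===== LEMMAS AND PROOFS =====

-- A's inner fold, run with the queue `rest ++ tagged nf`, is B's inner fold with the
-- new nodes appended (tagged with depth+1) behind `rest`.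
theorem pv_inner_rel (substr cur : String) (depth : Int) :
    ∀ (ns : List String) (e : List (String × String)) (v : PySem.Set String)
      (rest : List (String × Int)) (nf : List String),
      ns.foldl (pvInnerA substr cur depth)
        (e, v, rest ++ nf.map (fun d => (d, depth + 1)))
      = ((ns.foldl (pvInnerB substr cur) (e, v, nf)).1,
         (ns.foldl (pvInnerB substr cur) (e, v, nf)).2.1,
         rest ++ ((ns.foldl (pvInnerB substr cur) (e, v, nf)).2.2).map
           (fun d => (d, depth + 1))) := by
  intro ns
  induction ns with
  | nil => intro e v rest nf; simp
  | cons d ns ih =>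
    intro e v rest nf
    simp only [List.foldl_cons]
    by_cases h1 : ((!(substr == "")) && PySem.Str.isIn substr d) = true
    · simp only [pvInnerA, pvInnerB, h1, if_true]
      exact ih e v rest nf
    · by_cases h2 : PySem.Set.contains v d = true
      · simp only [pvInnerA, pvInnerB, h1, h2, Bool.false_eq_true, if_false, if_true]
        exact ih (e ++ [(cur, d)]) v rest nf
      · simp only [pvInnerA, pvInnerB, h1, h2, Bool.false_eq_true, if_false]
        have := ih (e ++ [(cur, d)]) (PySem.Set.add v d) rest (nf ++ [d])
        simpa [List.append_assoc] using this

-- skipping: every queue entry at depth ≥ max_depth is popped without effect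
theorem pv_skip_all (graph : List (String × List String)) (max_depth : Int) (substr : String)
    (depth : Int) (h : depth ≥ max_depth) :
    ∀ (F : List String) (v : PySem.Set String) (e : List (String × String)),
      pvLoopA graph max_depth substr (F.map (fun c => (c, depth))) v e = e := by
  intro F
  induction F with
  | nil => intro v e; simp [pvLoopA]
  | cons c F ih =>
    intro v e
    rw [List.map_cons, pvLoopA, if_pos h]
    exact ih v e

-- processing one whole level of A's queue = B's frontier fold
theorem pv_level_rel (graph : List (String × List String)) (max_depth : Int) (substr : String)
    (depth : Int) (h : ¬ depth ≥ max_depth) :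
    ∀ (F : List String) (e : List (String × String)) (v : PySem.Set String)
      (G : List String),
      pvLoopA graph max_depth substr
        (F.map (fun c => (c, depth)) ++ G.map (fun d => (d, depth + 1))) v e
      = (let st := F.foldl
            (fun st cur => ((PySem.Dict.mk graph).getD cur []).foldl (pvInnerB substr cur) st)
            (e, v, G)
         pvLoopA graph max_depth substr (st.2.2.map (fun d => (d, depth + 1))) st.2.1 st.1) := by
  intro F
  induction F with
  | nil => intro e v G; simp
  | cons cur F ih =>
    intro e v G
    rw [List.map_cons, List.cons_append, pvLoopA, if_neg h]
    rw [pv_inner_rel substr cur depth _ e v (F.map (fun c => (c, depth))) G]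
    simp only [List.foldl_cons]
    exact ih _ _ _

-- the main correspondence: A's tagged queue at a uniform depth vs B's remaining levels
theorem pv_main (graph : List (String × List String)) (max_depth : Int) (substr : String) :
    ∀ (n : Nat) (depth : Int), (max_depth - depth).toNat = n →
      ∀ (F : List String) (v : PySem.Set String) (e : List (String × String)),
        pvLoopA graph max_depth substr (F.map (fun c => (c, depth))) v e
        = pvLevelB graph substr n F v e := by
  intro n
  induction n with
  | zero =>
    intro depth hd F v e
    have h : depth ≥ max_depth := by omega
    rw [pv_skip_all graph max_depth substr depth h F v e, pvLevelB]
  | succ n ih =>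
    intro depth hd F v e
    have h : ¬ depth ≥ max_depth := by omega
    cases F with
    | nil => simp [pvLoopA, pvLevelB]
    | cons c F =>
      have := pv_level_rel graph max_depth substr depth h (c :: F) e v []
      simp only [List.map_nil, List.append_nil] at this
      rw [this]
      have hd' : (max_depth - (depth + 1)).toNat = n := by omega
      rw [ih (depth + 1) hd']
      simp [pvLevelB]

-- ===== VERDICT (by name: the statement is the Claim_ definition above) =====
theorem bfs_graph_spec : Claim_equal_bfs_graph := by
  intro graph start max_depth substr _
  unfold Spec_bfs_graph bfs_graph bfs_graph_alt
  have := pv_main graph max_depth substr max_depth.toNat 0 (by omega) [start]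
    (PySem.Set.add PySem.Set.empty start) []
  simp only [List.map_cons, List.map_nil] at this
  rw [this]
  rfl
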